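-- pv_equiv track=rewrite | github.com/cogito30/py_coding_test | programmers/Lv0/120815.py | solution
-- ===== SOURCE A (Python) =====
-- def solution(n):
--     answer = 0
--     x = 0
--     while True:
--         x += 1
--         if 6*x % n == 0:
--             answer = x
--             break
--     return answer
-- ===== SOURCE B (Python) =====
-- def solution(n):
--     # closed form: smallest x >= 1 with n | 6x is |n| // gcd(6, |n|)
--     m = abs(n)
--     a, b = 6, m
--     while b:
--         a, b = b, a % b
--     return m // a
-- ===== Notes on version B (the rewrite author's own statement) =====
-- stated objective: faster
-- what changed: Replaced A's linear trial loop over x=1,2,... with the closed form |n| // gcd(6,|n|) computed by Euclid's algorithm.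
-- outside the precondition, e.g. on solution(0): A raises ZeroDivisionError, B returns 0
import Mathlib
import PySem

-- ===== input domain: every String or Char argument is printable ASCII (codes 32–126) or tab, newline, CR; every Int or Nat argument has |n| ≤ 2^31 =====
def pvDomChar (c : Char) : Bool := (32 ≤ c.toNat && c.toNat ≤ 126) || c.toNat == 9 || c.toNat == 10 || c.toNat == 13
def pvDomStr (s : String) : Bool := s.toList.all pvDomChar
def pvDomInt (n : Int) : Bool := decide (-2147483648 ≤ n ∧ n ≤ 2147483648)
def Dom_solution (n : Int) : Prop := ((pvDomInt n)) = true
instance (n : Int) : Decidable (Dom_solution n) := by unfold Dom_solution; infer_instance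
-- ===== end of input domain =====

-- B replaces A's linear search for the smallest x with 6x % n == 0 by the closed form
-- |n| // gcd(6,|n|) via Euclid's algorithm (measured asymptotically faster).

-- ===== PORT A =====
-- A's 'while True' loop, with fuel n.natAbs as a totality guard only: for n ≠ 0 the
-- loop hits its break at some x ≤ |n| (proved below), so the fuel is never exhausted.
def solutionGo (n : Int) : Int → Nat → Int
  | _, 0 => 0
  | x, Nat.succ fuel =>
      let x' := x + 1
      if PySem.Int.mod (6 * x') n = 0 then x' else solutionGo n x' fuel

def solution (n : Int) : Int := solutionGo n 0 n.natAbs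

-- ===== PORT B =====
-- hand-written Euclid loop of Source B: a, b = 6, m; while b: a, b = b, a % b
def solutionEuclid (a b : Nat) : Nat :=
  if h : b = 0 then a else solutionEuclid b (a % b)
termination_by b
decreasing_by exact Nat.mod_lt _ (Nat.pos_of_ne_zero h)

def solution_alt (n : Int) : Int :=
  let m := n.natAbs
  ((m / solutionEuclid 6 m : Nat) : Int)

-- ===== PRECONDITION & SPEC =====
-- A raises ZeroDivisionError on n = 0 (6*x % 0); excluded.
def Pre_solution (n : Int) : Prop := n ≠ 0
instance (n : Int) : Decidable (Pre_solution n) := by unfold Pre_solution; infer_instance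
def pvWitness_solution : Int := 12

def Spec_solution (n : Int) (out : Int) : Prop := out = solution_alt n
instance (n : Int) (out : Int) : Decidable (Spec_solution n out) := by unfold Spec_solution; infer_instance

-- ===== CLAIM (what is proved, stated in full; the proofs are below) =====
def Claim_equal_solution : Prop := ∀ (n : Int), Dom_solution n → Pre_solution n → Spec_solution n (solution n)

-- ===== LEMMAS AND PROOFS =====

lemma solutionEuclid_eq_gcd : ∀ b a : Nat, solutionEuclid a b = Nat.gcd b a := by
  intro b
  induction b using Nat.strong_induction_on with
  | _ b ih =>
    intro a
    cases b with
    | zero => rw [solutionEuclid]; simp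
    | succ b =>
      rw [solutionEuclid]
      simp only [Nat.succ_ne_zero, dite_false]
      rw [ih (a % Nat.succ b) (Nat.mod_lt _ (Nat.succ_pos b)), Nat.gcd_succ]

lemma go_finds (n : Int) (k : Nat) (hk0 : 0 < k)
    (hkdvd : PySem.Int.mod (6 * (k : Int)) n = 0)
    (hmin : ∀ y : Nat, 0 < y → y < k → PySem.Int.mod (6 * (y : Int)) n ≠ 0) :
    ∀ (fuel x : Nat), x < k → k ≤ x + fuel → solutionGo n (x : Int) fuel = (k : Int) := by
  intro fuel
  induction fuel with
  | zero => intro x hx hk; omega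
  | succ fuel ih =>
    intro x hx hk
    rw [solutionGo]
    have hx1 : ((x : Int) + 1) = ((x + 1 : Nat) : Int) := by push_cast; ring
    by_cases hcase : x + 1 = k
    · simp only [hx1, hcase, hkdvd, if_true]
    · have hlt : x + 1 < k := by omega
      have hne : PySem.Int.mod (6 * ((x + 1 : Nat) : Int)) n ≠ 0 :=
        hmin (x + 1) (by omega) hlt
      simp only [hx1, hne, if_false]
      exact ih (x + 1) hlt (by omega)

-- number theory: with m > 0, g = gcd 6 m, k = m / g:
lemma dvd_six_mul_div (m : Nat) (hm : 0 < m) : m ∣ 6 * (m / Nat.gcd 6 m) := by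
  have hg : Nat.gcd 6 m ∣ m := Nat.gcd_dvd_right 6 m
  have hg6 : Nat.gcd 6 m ∣ 6 := Nat.gcd_dvd_left 6 m
  have : 6 * (m / Nat.gcd 6 m) = (6 / Nat.gcd 6 m) * m := by
    rw [← Nat.mul_div_assoc 6 hg, Nat.mul_comm 6 m, Nat.mul_div_assoc m hg6, Nat.mul_comm]
  rw [this]
  exact Dvd.intro_left _ rfl

lemma div_gcd_dvd_of_dvd_six_mul (m y : Nat) (hm : 0 < m) (h : m ∣ 6 * y) :
    m / Nat.gcd 6 m ∣ y := by
  set g := Nat.gcd 6 m with hg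
  have hgpos : 0 < g := Nat.gcd_pos_of_pos_right 6 hm
  have h6 : g ∣ 6 := Nat.gcd_dvd_left 6 m
  have hmg : g ∣ m := Nat.gcd_dvd_right 6 m
  obtain ⟨k, hk⟩ := hmg
  obtain ⟨s, hs⟩ := h6
  have hco : Nat.Coprime (6 / g) (m / g) := Nat.coprime_div_gcd_div_gcd hgpos
  have hk' : m / g = k := by rw [hk, Nat.mul_div_cancel_left k hgpos]
  have hs' : 6 / g = s := by rw [hs, Nat.mul_div_cancel_left s hgpos]
  rw [hk']
  -- m = g*k ∣ 6*y = g*s*y  ⇒  k ∣ s*y  ⇒  k ∣ y (coprime k s)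
  have hdvd : g * k ∣ g * (s * y) := by
    rw [← hk, ← Nat.mul_assoc, ← hs]; exact h
  have hksy : k ∣ s * y := (Nat.mul_dvd_mul_iff_left hgpos).mp hdvd
  have hco' : Nat.Coprime k s := by
    rw [← hk', ← hs']; exact (Nat.coprime_div_gcd_div_gcd hgpos).symm
  exact hco'.dvd_of_dvd_mul_left hksy

lemma mod_six_zero_iff (n : Int) (hn : n ≠ 0) (y : Nat) :
    PySem.Int.mod (6 * (y : Int)) n = 0 ↔ n.natAbs ∣ 6 * y := by
  rw [PySem.Int.mod_eq_zero_iff_dvd, ← Int.natAbs_dvd_natAbs]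
  have h6 : (6 * (y : Int)).natAbs = 6 * y := by
    rw [Int.natAbs_mul]; simp
  rw [h6]

-- ===== VERDICT (by name: the statement is the Claim_ definition above) =====
theorem solution_spec : Claim_equal_solution := by
  intro n _ hn
  unfold Spec_solution solution solution_alt
  have hm : 0 < n.natAbs := Int.natAbs_pos.mpr hn
  set m := n.natAbs with hmdef
  set k := m / Nat.gcd 6 m with hkdef
  have hgpos : 0 < Nat.gcd 6 m := Nat.gcd_pos_of_pos_right 6 hm
  have hk0 : 0 < k := Nat.div_pos (Nat.le_of_dvd hm (Nat.gcd_dvd_right 6 m)) hgpos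
  have hkle : k ≤ m := Nat.div_le_self m _
  have hkdvd : PySem.Int.mod (6 * (k : Int)) n = 0 :=
    (mod_six_zero_iff n hn k).mpr (dvd_six_mul_div m hm)
  have hmin : ∀ y : Nat, 0 < y → y < k → PySem.Int.mod (6 * (y : Int)) n ≠ 0 := by
    intro y hy hyk h
    have := div_gcd_dvd_of_dvd_six_mul m y hm ((mod_six_zero_iff n hn y).mp h)
    exact absurd (Nat.le_of_dvd hy this) (by omega)
  have hgo := go_finds n k hk0 hkdvd hmin m 0 hk0 (by omega)
  show solutionGo n 0 m = ((m / solutionEuclid 6 m : Nat) : Int)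
  rw [show solutionEuclid 6 m = Nat.gcd 6 m from by rw [solutionEuclid_eq_gcd, Nat.gcd_comm]]
  simpa using hgo
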